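-- pv_equiv track=rewrite | github.com/jumbokun/EpistemicFormulas | deintrospective.py | generate_all_worlds
-- ===== SOURCE A (Python) =====
-- from typing import List, Tuple, Optional
--
-- def generate_all_worlds(atoms: List[str]) -> List[dict]:
--     """
--     生成所有可能的原子命题真值组合
--     """
--     if not atoms:
--         return [{}]
--
--     worlds = []
--     n = len(atoms)
--
--     # 生成2^n个世界
--     for i in range(2**n):
--         world = {}
--         for j, atom in enumerate(atoms):
--             world[atom] = bool((i >> j) & 1)
--         worlds.append(world)
--
--     return worlds
-- ===== SOURCE B (Python) =====
-- from typing import List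
--
-- def generate_all_worlds(atoms: List[str]) -> List[dict]:
--     """Build worlds incrementally, doubling the list per atom (atom[0] varies fastest)."""
--     worlds = [{}]
--     for atom in atoms:
--         worlds = [{**w, atom: False} for w in worlds] + [{**w, atom: True} for w in worlds]
--     return worlds
-- ===== Notes on version B (the rewrite author's own statement) =====
-- stated objective: simpler
-- what changed: B builds the world list incrementally, doubling it once per atom (False-extensions then True-extensions of each partial world), instead of iterating over 2^n integers and bit-decoding each index; output list and dict key order are identical.
import Mathlib
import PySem

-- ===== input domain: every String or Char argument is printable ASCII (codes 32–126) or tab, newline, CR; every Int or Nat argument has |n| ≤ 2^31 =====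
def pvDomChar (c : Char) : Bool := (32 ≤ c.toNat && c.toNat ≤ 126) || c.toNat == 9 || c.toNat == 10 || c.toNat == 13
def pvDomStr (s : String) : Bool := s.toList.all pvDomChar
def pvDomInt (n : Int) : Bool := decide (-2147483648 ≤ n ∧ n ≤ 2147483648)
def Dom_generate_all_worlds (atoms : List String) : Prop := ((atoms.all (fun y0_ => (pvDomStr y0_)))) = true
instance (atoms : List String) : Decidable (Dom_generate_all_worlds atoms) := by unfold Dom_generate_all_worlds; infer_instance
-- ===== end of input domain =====

-- B builds the world list incrementally, doubling it per atom, instead of bit-decoding each of the 2^n integers; objective: simpler (same output, same order).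

-- ===== PORT A =====
-- bool((i >> j) & 1); the enumerate index j is always ≥ 0, so .toNat is exact
def pvBitA (i : Int) (j : Int) : Bool := (PySem.Int.band (i >>> j.toNat) 1) != 0

-- the inner loop: world = {}; for j, atom in enumerate(atoms): world[atom] = bool((i >> j) & 1)
def pvWorldA (atoms : List String) (i : Int) : PySem.Dict String Bool :=
  (PySem.List.enumerate atoms).foldl (fun world ja => world.insert ja.2 (pvBitA i ja.1)) PySem.Dict.empty

def generate_all_worlds (atoms : List String) : List (List (String × Bool)) :=
  if atoms = [] then [[]]
  else
    (PySem.List.pyRange 0 (2 ^ atoms.length) 1).foldl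
      (fun worlds i => worlds ++ [(pvWorldA atoms i).items]) []

-- ===== PORT B =====
-- worlds = [{**w, atom: False} for w in worlds] + [{**w, atom: True} for w in worlds]
def generate_all_worlds_alt (atoms : List String) : List (List (String × Bool)) :=
  (atoms.foldl
    (fun worlds atom =>
      worlds.map (fun w => w.insert atom false) ++ worlds.map (fun w => w.insert atom true))
    [PySem.Dict.empty]).map PySem.Dict.items

-- ===== PRECONDITION & SPEC =====
def Spec_generate_all_worlds (atoms : List String) (out : List (List (String × Bool))) : Prop := out = generate_all_worlds_alt atoms
instance (atoms : List String) (out : List (List (String × Bool))) : Decidable (Spec_generate_all_worlds atoms out) := by unfold Spec_generate_all_worlds; infer_instance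

-- ===== CLAIM (what is proved, stated in full; the proofs are below) =====
def Claim_equal_generate_all_worlds : Prop := ∀ (atoms : List String), Dom_generate_all_worlds atoms → Spec_generate_all_worlds atoms (generate_all_worlds atoms)

-- ===== LEMMAS AND PROOFS =====

-- pvBitA on a Nat cast is Nat.testBit
theorem pvBitA_natCast (k j : Nat) : pvBitA (k : Int) (j : Int) = Nat.testBit k j := by
  have h1 : ((k:Int) >>> ((j:Int)).toNat) = ((k >>> j : Nat) : Int) := rfl
  have h2 : PySem.Int.band ((k >>> j : Nat) : Int) 1 = (((k >>> j) &&& 1 : Nat) : Int) := by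
    exact_mod_cast PySem.Int.band_natCast (k >>> j) 1
  simp only [pvBitA, h1, h2]
  rcases Nat.and_one_is_mod (k >>> j) ▸ Nat.mod_two_eq_zero_or_one (k >>> j) with h | h <;>
    simp [Nat.testBit, ← Nat.and_one_is_mod, h]

theorem enumerate_append_singleton {α : Type} (xs : List α) (x : α) (s : Int) :
    PySem.List.enumerate (xs ++ [x]) s = PySem.List.enumerate xs s ++ [(s + xs.length, x)] := by
  induction xs generalizing s with
  | nil => simp [PySem.List.enumerate_nil, PySem.List.enumerate_cons]
  | cons y ys ih =>
    simp [PySem.List.enumerate_cons, ih]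
    ring_nf

-- indices appearing in `enumerate xs s` lie in [s, s + xs.length)
theorem enumFold_congr (atoms : List String) (s : Int) (w : PySem.Dict String Bool)
    (i i' : Int) (h : ∀ j : Int, s ≤ j → j < s + atoms.length → pvBitA i j = pvBitA i' j) :
    (PySem.List.enumerate atoms s).foldl (fun world ja => world.insert ja.2 (pvBitA i ja.1)) w
    = (PySem.List.enumerate atoms s).foldl (fun world ja => world.insert ja.2 (pvBitA i' ja.1)) w := by
  induction atoms generalizing s w with
  | nil => simp [PySem.List.enumerate_nil]
  | cons a as ih =>
    simp only [PySem.List.enumerate_cons, List.foldl_cons]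
    rw [h s le_rfl (by simp only [List.length_cons]; push_cast; omega)]
    exact ih (s + 1) _ (fun j h1 h2 =>
      h j (by omega) (by simp only [List.length_cons]; push_cast at h2 ⊢; omega))

-- pvWorldA over a snoc inserts the last atom with the top bit
theorem pvWorldA_append (atoms : List String) (a : String) (i : Int) :
    pvWorldA (atoms ++ [a]) i
    = (pvWorldA atoms i).insert a (pvBitA i atoms.length) := by
  simp [pvWorldA, enumerate_append_singleton, List.foldl_append]

-- pvWorldA only looks at bits below the length
theorem pvWorldA_congr (atoms : List String) (i i' : Int)
    (h : ∀ j : Int, 0 ≤ j → j < atoms.length → pvBitA i j = pvBitA i' j) :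
    pvWorldA atoms i = pvWorldA atoms i' := by
  unfold pvWorldA
  exact enumFold_congr atoms 0 _ i i' (fun j h1 h2 => h j h1 (by omega))

-- range(2^n) as a Nat range
theorem pyRange_two_pow (n : Nat) :
    PySem.List.pyRange 0 (2 ^ n : Int) 1 = (List.range (2 ^ n)).map (fun (k : Nat) => (k : Int)) := by
  rw [PySem.List.pyRange_one]
  have : ((2 ^ n : Int) - 0).toNat = 2 ^ n := by
    simp
    exact_mod_cast Int.toNat_natCast (2 ^ n)
  rw [this]
  apply List.map_congr_left
  intro k _
  omega

-- the core: A's bit-decoded world list equals B's doubled world list (at the Dict level)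
theorem core (atoms : List String) :
    (List.range (2 ^ atoms.length)).map (fun (k : Nat) => pvWorldA atoms (k : Int))
    = atoms.foldl
        (fun worlds atom =>
          worlds.map (fun w => w.insert atom false) ++ worlds.map (fun w => w.insert atom true))
        [PySem.Dict.empty] := by
  induction atoms using List.reverseRecOn with
  | nil => simp [List.range, List.range.loop, pvWorldA, PySem.List.enumerate_nil]
  | append_singleton as a ih =>
    rw [List.foldl_append, List.foldl_cons, List.foldl_nil, ← ih]
    have hlen : (as ++ [a]).length = as.length + 1 := by simp
    rw [hlen, pow_succ, mul_two, List.range_add, List.map_append, List.map_map, List.map_map,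
      List.map_map]
    congr 1
    · -- first half: k < 2^n, top bit 0, lower bits unchanged
      apply List.map_congr_left
      intro k hk
      simp only [List.mem_range] at hk
      rw [pvWorldA_append]
      have htop : pvBitA (k : Int) (as.length : Int) = false := by
        rw [pvBitA_natCast]
        exact Nat.testBit_lt_two_pow hk
      simp [htop]
    · -- second half: argument 2^n + k, top bit 1, lower bits those of k
      apply List.map_congr_left
      intro k hk
      simp only [List.mem_range] at hk
      simp only [Function.comp]
      rw [pvWorldA_append]
      have htop : pvBitA ((2 ^ as.length + k : Nat) : Int) (as.length : Int) = true := by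
        rw [pvBitA_natCast]
        rw [Nat.testBit_two_pow_add_eq, Nat.testBit_lt_two_pow hk]
        rfl
      have hlow : pvWorldA as ((2 ^ as.length + k : Nat) : Int) = pvWorldA as (k : Int) := by
        apply pvWorldA_congr
        intro j h0 hj
        lift j to Nat using h0
        rw [pvBitA_natCast, pvBitA_natCast]
        rw [Nat.testBit_two_pow_add_gt (by exact_mod_cast hj) k]
      rw [htop, hlow]

-- ===== VERDICT (by name: the statement is the Claim_ definition above) =====
theorem generate_all_worlds_spec : Claim_equal_generate_all_worlds := by
  intro atoms _
  unfold Spec_generate_all_worlds generate_all_worlds generate_all_worlds_alt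
  rw [← core]
  split_ifs with h
  · subst h; decide
  · rw [PySem.List.foldl_append_singleton_eq_map, pyRange_two_pow, List.map_map, List.map_map]
    rfl
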